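-- pv_equiv track=rewrite | github.com/lagoueduCol/Algorithm-Dryad | 01.Stack/Example04.py | findSmallSeq
-- ===== SOURCE A (Python) =====
-- def findSmallSeq(nums, k):
--   if not nums or len(nums) == 0 or k <= 0:
--     return []
--
--   ans = [0] * k
--   s = []
--
--   # 这里生成单调栈
--   for i in range(0, len(nums)):
--     x = nums[i]
--     left = len(nums) - i
--     # 注意我们想要提取出k个数，所以注意控制扔掉的数的个数
--     while len(s) > 0 and (len(s) + left) > k and s[-1] > x:
--       s.pop()
--     s.append(x)
--
--   # 如果递增栈里面的数太多，那么我们只需要取出前k个就可以了。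
--   # 多余的栈中的元素需要扔掉。
--   while len(s) > k:
--     s.pop()
--
--   # 把k个元素取出来，注意这里取的顺序!
--   for i in range(k-1, -1, -1):
--     ans[i] = s[-1]
--     s.pop()
--
--   return ans
-- ===== SOURCE B (Python) =====
-- def findSmallSeq(nums, k):
--     if not nums or k <= 0:
--         return []
--     res = []
--     rest = nums
--     for r in range(k, 0, -1):
--         # pick the leftmost minimum among the first len(rest)-r+1 elements
--         best = 0
--         for j in range(1, len(rest) - r + 1):
--             if rest[j] < rest[best]:
--                 best = j
--         res.append(rest[best])
--         rest = rest[best + 1:]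
--     return res
-- ===== Notes on version B (the rewrite author's own statement) =====
-- stated objective: alternative
-- what changed: Replaces the capacity-constrained monotonic stack (push/pop over the whole array, then truncate and unload) with direct greedy selection: k times pick the leftmost minimum of the still-feasible window and continue on the suffix after it.
import Mathlib
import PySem

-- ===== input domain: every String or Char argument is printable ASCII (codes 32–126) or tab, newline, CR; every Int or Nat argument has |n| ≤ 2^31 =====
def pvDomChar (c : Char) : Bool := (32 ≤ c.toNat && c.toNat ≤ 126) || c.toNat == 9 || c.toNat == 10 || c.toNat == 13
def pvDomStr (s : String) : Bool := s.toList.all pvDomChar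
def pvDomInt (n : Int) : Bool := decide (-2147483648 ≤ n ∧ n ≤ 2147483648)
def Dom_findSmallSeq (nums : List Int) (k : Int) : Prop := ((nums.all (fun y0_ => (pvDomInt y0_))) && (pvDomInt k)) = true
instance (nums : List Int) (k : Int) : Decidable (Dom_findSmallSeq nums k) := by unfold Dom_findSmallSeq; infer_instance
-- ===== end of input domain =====

-- B replaces A's monotonic stack with greedy leftmost-minimum selection (an alternative
-- algorithm, not claimed faster); proved equal wherever A returns (Pre_ excludes the
-- k > len(nums) inputs on which A raises IndexError, as does B).


-- ===== PORT A =====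
-- The Python stack s (append/pop/s[-1] at the end) is rendered as a cons list with the
-- TOP at the head: append = cons, pop = tail, s[-1] = head.

-- the inner `while len(s) > 0 and (len(s) + left) > k and s[-1] > x: s.pop()`
def popW (k left : Nat) (x : Int) : List Int → List Int
  | [] => []
  | t :: s => if s.length + 1 + left > k ∧ x < t then popW k left x s else t :: s

-- the first for loop: left = len(nums) - i = (length of rest incl. current) ; then append x
def buildS (k : Nat) (s : List Int) : List Int → List Int
  | [] => s
  | x :: rest => buildS k (x :: popW k (rest.length + 1) x s) rest

-- `while len(s) > k: s.pop()`
def truncW (k : Nat) (s : List Int) : List Int :=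
  if h : s.length > k then truncW k s.tail else s
termination_by s.length
decreasing_by cases s with
  | nil => simp at h
  | cons a t => simp

-- `for i in range(k-1, -1, -1): ans[i] = s[-1]; s.pop()`  (s[-1] on [] is Python's
-- IndexError, which only happens outside Pre_; headD 0 is a placeholder there)
def fillW : Nat → List Int → List Int → List Int
  | 0, _, ans => ans
  | i + 1, s, ans => fillW i s.tail (ans.set i (s.headD 0))

def findSmallSeq (nums : List Int) (k : Int) : List Int :=
  if nums = [] ∨ k ≤ 0 then []
  else fillW k.toNat (truncW k.toNat (buildS k.toNat [] nums)) (List.replicate k.toNat 0)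

-- ===== PORT B =====
-- inner for loop: scan j = 1 .. stop-1, keeping the leftmost minimum index
def innerB (xs : List Int) (best j stop : Nat) : Nat :=
  if j < stop then
    innerB xs (if xs.getD j 0 < xs.getD best 0 then j else best) (j + 1) stop
  else best
termination_by stop - j

-- outer for loop over r = k, k-1, …, 1, with the result accumulator and remaining suffix
def loopB (res rest : List Int) : Nat → List Int
  | 0 => res
  | r + 1 =>
    let best := innerB rest 0 1 (rest.length - (r + 1) + 1)
    loopB (res ++ [rest.getD best 0]) (rest.drop (best + 1)) r

def findSmallSeq_alt (nums : List Int) (k : Int) : List Int :=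
  if nums = [] ∨ k ≤ 0 then [] else loopB [] nums k.toNat

-- ===== PRECONDITION & SPEC =====
-- Pre_ excludes exactly the inputs (nums ≠ [], 0 < k, k > len(nums)) on which the Python A
-- raises IndexError (s.pop() / s[-1] on an exhausted stack); B raises IndexError there too.
def Pre_findSmallSeq (nums : List Int) (k : Int) : Prop :=
  nums = [] ∨ k ≤ 0 ∨ k ≤ (nums.length : Int)
instance (nums : List Int) (k : Int) : Decidable (Pre_findSmallSeq nums k) := by
  unfold Pre_findSmallSeq; infer_instance

def pvWitness_findSmallSeq : List Int × Int := ([3, 1, 4, 1, 5], 2)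

def Spec_findSmallSeq (nums : List Int) (k : Int) (out : List Int) : Prop := out = findSmallSeq_alt nums k
instance (nums : List Int) (k : Int) (out : List Int) : Decidable (Spec_findSmallSeq nums k out) := by unfold Spec_findSmallSeq; infer_instance

-- ===== CLAIM (what is proved, stated in full; the proofs are below) =====
def Claim_equal_findSmallSeq : Prop := ∀ (nums : List Int) (k : Int), Dom_findSmallSeq nums k → Pre_findSmallSeq nums k → Spec_findSmallSeq nums k (findSmallSeq nums k)

-- ===== LEMMAS AND PROOFS =====

-- non-accumulator form of B's selection, used only for reasoning
def sel : List Int → Nat → List Int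
  | _, 0 => []
  | xs, r + 1 =>
    let m := innerB xs 0 1 (xs.length - (r + 1) + 1)
    xs.getD m 0 :: sel (xs.drop (m + 1)) r

theorem loopB_eq_sel (r : Nat) : ∀ (res rest : List Int), loopB res rest r = res ++ sel rest r := by
  induction r with
  | zero => intro res rest; simp [loopB, sel]
  | succ r ih => intro res rest; simp [loopB, sel, ih]

theorem popW_subset {k l : Nat} {x t : Int} : ∀ {s : List Int}, t ∈ popW k l x s → t ∈ s := by
  intro s
  induction s with
  | nil => simp [popW]
  | cons a s ih =>
    simp only [popW]
    split
    · intro h; exact List.mem_cons_of_mem _ (ih h)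
    · exact fun h => h

theorem popW_empty {k l : Nat} {b : Int} (hkl : k ≤ l) :
    ∀ {s : List Int}, (∀ t ∈ s, b < t) → popW k l b s = [] := by
  intro s
  induction s with
  | nil => intro _; rfl
  | cons a s ih =>
    intro h
    have hb : b < a := h a List.mem_cons_self
    simp only [popW]
    rw [if_pos (⟨by omega, hb⟩ : s.length + 1 + l > k ∧ b < a)]
    exact ih (fun t ht => h t (List.mem_cons_of_mem _ ht))

-- Phase 1: everything strictly above the window minimum b gets popped when b arrives.
theorem buildS_empty_prefix {k : Nat} {b : Int} :
    ∀ (p : List Int) (rest s : List Int), (∀ t ∈ s, b < t) → (∀ t ∈ p, b < t) →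
      k ≤ rest.length + 1 → buildS k s (p ++ b :: rest) = buildS k [b] rest := by
  intro p
  induction p with
  | nil =>
    intro rest s hs _ hk
    simp only [List.nil_append, buildS]
    rw [popW_empty hk hs]
  | cons x p ih =>
    intro rest s hs hp hk
    simp only [List.cons_append, buildS]
    refine ih rest _ ?_ (fun t ht => hp t (List.mem_cons_of_mem _ ht)) hk
    intro t ht
    rcases List.mem_cons.mp ht with rfl | ht'
    · exact hp t List.mem_cons_self
    · exact hs t (popW_subset ht')

theorem popW_pinned {k l : Nat} {b x : Int} (hk : 1 ≤ k) (hbx : k ≤ l → b ≤ x) :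
    ∀ (u : List Int), popW k l x (u ++ [b]) = popW (k - 1) l x u ++ [b] := by
  intro u
  induction u with
  | nil =>
    simp only [List.nil_append, popW]
    split
    · rename_i h
      exfalso
      have : k ≤ l := by simp at h; omega
      exact absurd h.2 (not_lt.mpr (hbx this))
    · rfl
  | cons t u ih =>
    simp only [List.cons_append, popW, List.length_append]
    by_cases hcond : u.length + 1 + l > k - 1 ∧ x < t
    · rw [if_pos (by simp; omega), if_pos hcond, ih]
    · rw [if_neg (by simp; omega), if_neg hcond]
      rfl

-- Phase 2: with the window minimum b pinned at the bottom, the stack above it evolves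
-- exactly like an independent stack with capacity k-1.
theorem buildS_pinned {b : Int} {k : Nat} (hk : 1 ≤ k) :
    ∀ (rest u : List Int), (∀ i : Nat, i + k ≤ rest.length → b ≤ rest.getD i 0) →
      buildS k (u ++ [b]) rest = buildS (k - 1) u rest ++ [b] := by
  intro rest
  induction rest with
  | nil => intro u _; simp [buildS]
  | cons x rest ih =>
    intro u hH
    simp only [buildS]
    have h0 : k ≤ rest.length + 1 → b ≤ x := by
      intro h; have := hH 0 (by simpa using h); simpa using this
    rw [popW_pinned hk h0]
    have := ih (x :: popW (k - 1) (rest.length + 1) x u)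
      (fun i hi => by have := hH (i + 1) (by simp; omega); simpa using this)
    simpa using this

-- characterisation of B's inner scan: leftmost minimum of the first `stop` elements
theorem innerB_props (xs : List Int) :
    ∀ (d j best stop : Nat), stop = j + d → best < j →
      (∀ t < best, xs.getD best 0 < xs.getD t 0) →
      (∀ t < j, xs.getD best 0 ≤ xs.getD t 0) →
      innerB xs best j stop < stop ∧
      (∀ t < innerB xs best j stop, xs.getD (innerB xs best j stop) 0 < xs.getD t 0) ∧
      (∀ t < stop, xs.getD (innerB xs best j stop) 0 ≤ xs.getD t 0) := by
  intro d
  induction d with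
  | zero =>
    intro j best stop hstop hbj hstrict hle
    have hjs : ¬ j < stop := by omega
    rw [innerB, if_neg hjs]
    exact ⟨by omega, hstrict, fun t ht => hle t (by omega)⟩
  | succ d ih =>
    intro j best stop hstop hbj hstrict hle
    have hjs : j < stop := by omega
    rw [innerB, if_pos hjs]
    by_cases hc : xs.getD j 0 < xs.getD best 0
    · rw [if_pos hc]
      refine ih (j + 1) j stop (by omega) (by omega) ?_ ?_
      · intro t ht; exact lt_of_lt_of_le hc (hle t ht)
      · intro t ht
        rcases Nat.lt_or_ge t j with h | h
        · exact le_of_lt (lt_of_lt_of_le hc (hle t h))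
        · have ht' : t = j := by omega
          subst ht'
          exact le_refl _
    · rw [if_neg hc]
      refine ih (j + 1) best stop (by omega) (by omega) hstrict ?_
      intro t ht
      rcases Nat.lt_or_ge t j with h | h
      · exact hle t h
      · have ht' : t = j := by omega
        subst ht'
        exact not_lt.mp hc

-- MAIN: the stack built with capacity r, read bottom-first and cut to r elements,
-- is exactly greedy leftmost-minimum selection; and it has at least r elements.
theorem main_sel : ∀ (r : Nat) (xs : List Int), r ≤ xs.length →
    (buildS r [] xs).reverse.take r = sel xs r ∧ r ≤ (buildS r [] xs).length := by
  intro r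
  induction r with
  | zero => intro xs _; simp [sel]
  | succ r ih =>
    intro xs hlen
    set stop := xs.length - (r + 1) + 1 with hstopdef
    have hstop1 : 1 ≤ stop := by omega
    obtain ⟨hmlt, hstrict, hmin⟩ :=
      innerB_props xs (stop - 1) 1 0 stop (by omega) (by omega)
        (by intro t ht; omega) (by intro t ht; interval_cases t; exact le_refl _)
    set m := innerB xs 0 1 stop with hmdef
    have hmxs : m < xs.length := by omega
    have hb : xs.getD m 0 = xs[m] := List.getD_eq_getElem xs 0 hmxs
    -- decompose xs around position m
    have hdecomp : xs = xs.take m ++ xs[m] :: xs.drop (m + 1) := by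
      conv_lhs => rw [← List.take_append_drop m xs]
      rw [List.drop_eq_getElem_cons hmxs]
    set rest := xs.drop (m + 1) with hrestdef
    have hrestlen : rest.length = xs.length - (m + 1) := by simp [hrestdef]
    -- phase 1
    have h1 : buildS (r + 1) [] xs = buildS (r + 1) [xs[m]] rest := by
      conv_lhs => rw [hdecomp]
      refine buildS_empty_prefix (xs.take m) rest [] (by simp) ?_ (by omega)
      intro t ht
      rw [List.mem_take_iff_getElem] at ht
      obtain ⟨i, hi, rfl⟩ := ht
      have hi' : i < m := by omega
      have := hstrict i hi'
      rw [hb, List.getD_eq_getElem xs 0 (by omega)] at this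
      exact this
    -- phase 2
    have h2 : buildS (r + 1) [xs[m]] rest = buildS r [] rest ++ [xs[m]] := by
      have := buildS_pinned (b := xs[m]) (k := r + 1) (by omega) rest []
        (fun i hi => by
          have hglobal : m + 1 + i < xs.length := by omega
          have hwin : m + 1 + i < stop := by omega
          have := hmin (m + 1 + i) hwin
          rw [hb, List.getD_eq_getElem xs 0 hglobal] at this
          rw [hrestdef, List.getD_eq_getElem _ 0 (by rw [List.length_drop]; omega),
              List.getElem_drop]
          exact this)
      simpa using this
    have hrrest : r ≤ rest.length := by omega
    obtain ⟨ihtake, ihlen⟩ := ih rest hrrest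
    constructor
    · rw [h1, h2]
      show (buildS r [] rest ++ [xs[m]]).reverse.take (r + 1) = sel xs (r + 1)
      rw [List.reverse_append]
      simp only [List.reverse_singleton, List.singleton_append, List.take_succ_cons]
      rw [ihtake]
      simp only [sel]
      rw [← hstopdef, ← hmdef, hb, hrestdef]
    · rw [h1, h2]
      simp only [List.length_append, List.length_singleton]
      omega

theorem drop_set_succ (ans : List Int) : ∀ (i : Nat) (a : Int), i < ans.length →
    (ans.set i a).drop i = a :: ans.drop (i + 1) := by
  induction ans with
  | nil => intro i a h; simp at h
  | cons x t ih =>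
    intro i a h
    cases i with
    | zero => simp
    | succ i =>
      simp only [List.set_cons_succ, List.drop_succ_cons]
      exact ih i a (by simpa using h)

-- A's unloading loop writes the stack (top first) into ans[k-1], …, ans[0]
theorem fillW_eq : ∀ (i : Nat) (s ans : List Int), i ≤ s.length → i ≤ ans.length →
    fillW i s ans = (s.take i).reverse ++ ans.drop i := by
  intro i
  induction i with
  | zero => intro s ans _ _; simp [fillW]
  | succ i ih =>
    intro s ans hs hans
    cases s with
    | nil => simp at hs
    | cons a s =>
      simp only [fillW, List.tail_cons, List.headD_cons]
      rw [ih s (ans.set i a) (by simpa using hs) (by simp; omega)]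
      rw [drop_set_succ ans i a (by omega)]
      simp [List.take_succ_cons]

theorem truncW_eq_drop (k : Nat) : ∀ (s : List Int), truncW k s = s.drop (s.length - k) := by
  intro s
  induction s with
  | nil => rw [truncW]; simp
  | cons a s ih =>
    rw [truncW]
    by_cases h : (a :: s).length > k
    · rw [dif_pos h, List.tail_cons, ih]
      have : (a :: s).length - k = (s.length - k) + 1 := by simp at h ⊢; omega
      rw [this, List.drop_succ_cons]
    · rw [dif_neg h]
      have : (a :: s).length - k = 0 := by omega
      rw [this, List.drop_zero]

theorem reverse_drop_take (s : List Int) (k : Nat) :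
    (s.drop (s.length - k)).reverse = s.reverse.take k := by
  rcases Nat.le_total k s.length with h | h
  · rw [List.reverse_drop]
    congr 1
    omega
  · rw [Nat.sub_eq_zero_of_le h, List.drop_zero, List.take_of_length_le (by simpa using h)]

-- ===== VERDICT (by name: the statement is the Claim_ definition above) =====
theorem findSmallSeq_spec : Claim_equal_findSmallSeq := by
  intro nums k _ hpre
  unfold Spec_findSmallSeq findSmallSeq findSmallSeq_alt
  by_cases hg : nums = [] ∨ k ≤ 0
  · rw [if_pos hg, if_pos hg]
  · rw [if_neg hg, if_neg hg]
    rw [not_or, not_le] at hg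
    obtain ⟨hne, hkpos⟩ := hg
    have hkn : k ≤ (nums.length : Int) := by
      rcases hpre with h | h | h
      · exact absurd h hne
      · omega
      · exact h
    have hkt : k.toNat ≤ nums.length := by omega
    obtain ⟨htake, hlen⟩ := main_sel k.toNat nums hkt
    set S := buildS k.toNat [] nums with hS
    have htr : truncW k.toNat S = S.drop (S.length - k.toNat) := truncW_eq_drop _ _
    have htrlen : (truncW k.toNat S).length = k.toNat := by
      rw [htr, List.length_drop]; omega
    have e1 : (truncW k.toNat S).take k.toNat = truncW k.toNat S :=
      List.take_of_length_le (by rw [htrlen])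
    rw [fillW_eq k.toNat _ _ (by rw [htrlen]) (by simp), e1,
        List.drop_of_length_le (by simp), List.append_nil, htr, reverse_drop_take,
        htake, loopB_eq_sel, List.nil_append]
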